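-- pv_equiv track=rewrite | github.com/chengpeng-wang/LLMDFA | src/run_baseline.py | is_labeled
-- ===== SOURCE A (Python) =====
-- def is_labeled(function_str: str, line_number: int) -> bool:
--     """
--     Checks if a function string is labeled with a potential flaw or fix.
--     """
--     split_strs = function_str.split("\n")
--     line_number = min(len(split_strs) - 1, line_number)
--     while 0 <= line_number <= len(split_strs) - 1:
--         if "POTENTIAL FLAW:" in split_strs[line_number]:
--             return True
--         if "FIX:" in split_strs[line_number]:
--             return False
--         line_number -= 1
--     return True
-- ===== SOURCE B (Python) =====
-- def is_labeled(function_str: str, line_number: int) -> bool: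
--     """
--     Forward scan: keep the last marker seen at or below the clamped line;
--     default True when no marker is in range.
--     """
--     lines = function_str.split("\n")
--     end = min(len(lines) - 1, line_number) + 1
--     result = True
--     for i in range(end):
--         if "POTENTIAL FLAW:" in lines[i]:
--             result = True
--         elif "FIX:" in lines[i]:
--             result = False
--     return result
-- ===== Notes on version B (the rewrite author's own statement) =====
-- stated objective: alternative
-- what changed: Replaces A's backward early-exit while-loop with a forward accumulator pass over range(0, clamped+1) that records the last marker seen; the nearest marker at-or-below the line is the last one the forward scan records.
import Mathlib
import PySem

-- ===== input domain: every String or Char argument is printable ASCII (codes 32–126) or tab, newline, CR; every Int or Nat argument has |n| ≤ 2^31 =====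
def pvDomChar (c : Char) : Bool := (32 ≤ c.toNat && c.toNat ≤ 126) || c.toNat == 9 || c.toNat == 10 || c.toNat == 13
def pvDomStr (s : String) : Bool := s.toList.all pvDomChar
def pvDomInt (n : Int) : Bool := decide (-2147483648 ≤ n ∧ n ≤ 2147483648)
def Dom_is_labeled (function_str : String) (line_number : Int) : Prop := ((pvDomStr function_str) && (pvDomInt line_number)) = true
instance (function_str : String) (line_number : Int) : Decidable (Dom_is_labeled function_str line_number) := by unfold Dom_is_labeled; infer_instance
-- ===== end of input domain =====

-- B replaces A's backward early-exit scan by a forward accumulator pass (alternative decomposition, same cost).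

-- ===== PORT A =====
-- A: scans BACKWARD from the clamped line, early exit at the first marker found.
def aLoop (lines : List String) (ln : Int) : Bool :=
  if h : 0 ≤ ln ∧ ln ≤ (lines.length : Int) - 1 then
    let line := PySem.List.pyGetD lines ln ""
    if PySem.Str.isIn "POTENTIAL FLAW:" line then true
    else if PySem.Str.isIn "FIX:" line then false
    else aLoop lines (ln - 1)
  else true
termination_by (ln + 1).toNat
decreasing_by omega

def is_labeled (function_str : String) (line_number : Int) : Bool :=
  let split_strs := (PySem.Str.split? function_str "\n").getD []
  aLoop split_strs (min ((split_strs.length : Int) - 1) line_number)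

-- ===== PORT B =====
-- B: forward pass over range(0, clamped+1), keeping the last marker seen in an accumulator.
def bStep (lines : List String) (res : Bool) (i : Int) : Bool :=
  if PySem.Str.isIn "POTENTIAL FLAW:" (PySem.List.pyGetD lines i "") then true
  else if PySem.Str.isIn "FIX:" (PySem.List.pyGetD lines i "") then false
  else res

def is_labeled_alt (function_str : String) (line_number : Int) : Bool :=
  let lines := (PySem.Str.split? function_str "\n").getD []
  let stop := min ((lines.length : Int) - 1) line_number + 1
  (PySem.List.pyRange 0 stop 1).foldl (bStep lines) true

-- ===== PRECONDITION & SPEC =====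
def Spec_is_labeled (function_str : String) (line_number : Int) (out : Bool) : Prop := out = is_labeled_alt function_str line_number
instance (function_str : String) (line_number : Int) (out : Bool) : Decidable (Spec_is_labeled function_str line_number out) := by unfold Spec_is_labeled; infer_instance

-- ===== CLAIM (what is proved, stated in full; the proofs are below) =====
def Claim_equal_is_labeled : Prop := ∀ (function_str : String) (line_number : Int), Dom_is_labeled function_str line_number → Spec_is_labeled function_str line_number (is_labeled function_str line_number)

-- ===== LEMMAS AND PROOFS =====
lemma forward_eq_backward (lines : List String) (k : Int) (hk : k ≤ (lines.length : Int) - 1) :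
    (PySem.List.pyRange 0 (k + 1) 1).foldl (bStep lines) true = aLoop lines k := by
  by_cases h0 : 0 ≤ k
  · have ih := forward_eq_backward lines (k - 1) (by omega)
    have hk1 : k - 1 + 1 = k := by omega
    rw [hk1] at ih
    rw [PySem.List.pyRange_one_succ_right (by omega : (0:Int) ≤ k), List.foldl_append,
        List.foldl_cons, List.foldl_nil, aLoop]
    simp only [h0, hk, and_self, dite_true]
    unfold bStep
    split_ifs with h1 h2
    · rfl
    · rfl
    · exact ih
  · rw [PySem.List.pyRange_one_eq_nil (by omega : k + 1 ≤ 0), aLoop,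
        dif_neg (by omega : ¬ (0 ≤ k ∧ k ≤ (lines.length : Int) - 1))]
    rfl
termination_by (k + 1).toNat
decreasing_by omega

-- ===== VERDICT (by name: the statement is the Claim_ definition above) =====
theorem is_labeled_spec : Claim_equal_is_labeled := by
  intro fs ln _
  unfold Spec_is_labeled is_labeled is_labeled_alt
  exact (forward_eq_backward _ _ (by omega)).symm
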